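-- pv_equiv track=rewrite | github.com/theperiperi/CP-Prep-Questions | Python/Sliding Window/3557. Find Maximum Number of Non Intersecting Substrings.py | maxSubstrings
-- ===== SOURCE A (Python) =====
-- def maxSubstrings(word):
--     """
--     :type word: str
--     :rtype: int
--     """
--
--     characters = list(word)
--     seen_chars = set()
--     if len(characters) < 4:
--         return 0
--
--     length = len(characters)
--     start = 0
--     end = 3
--     count = 0
--     seen_chars.add(characters[0])
--
--     while end < length:
--         if characters[end] in seen_chars:
--             count += 1
--             start = end + 1
--             end = start + 3
--             if start < length:
--                 seen_chars = set(characters[start])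
--         else:
--             seen_chars.add(characters[end - 2])
--             end += 1
--
--     return count
-- ===== SOURCE B (Python) =====
-- def maxSubstrings(word):
--     """
--     :type word: str
--     :rtype: int
--     """
--     # Stage 1: build an inverted index: every character -> sorted list of its positions.
--     pos = {}
--     for i, c in enumerate(word):
--         pos.setdefault(c, []).append(i)
--     # Stage 2: greedy scan with monotone per-character pointers into the index.
--     # The earliest occurrence of c at or after `start` is found by advancing a pointer
--     # (amortized O(1)); a substring is closed as soon as that occurrence is >= 3 back.
--     ptr = {}
--     count = 0
--     start = 0
--     for i, c in enumerate(word):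
--         p = pos[c]
--         k = ptr.get(c, 0)
--         while p[k] < start:
--             k += 1
--         ptr[c] = k
--         if i - p[k] >= 3:
--             count += 1
--             start = i + 1
--     return count
-- ===== Notes on version B (the rewrite author's own statement) =====
-- stated objective: alternative
-- what changed: A's single sliding-window pass with a lag-populated seen-set (adding characters[end-2] each step, rebuilding the set after a cut) is replaced by a two-stage algorithm: first build an inverted index mapping each character to its sorted occurrence list, then one greedy scan that finds each character's earliest occurrence in the current segment via monotone pointers into that index and cuts when it is at least 3 back.
import Mathlib
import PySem

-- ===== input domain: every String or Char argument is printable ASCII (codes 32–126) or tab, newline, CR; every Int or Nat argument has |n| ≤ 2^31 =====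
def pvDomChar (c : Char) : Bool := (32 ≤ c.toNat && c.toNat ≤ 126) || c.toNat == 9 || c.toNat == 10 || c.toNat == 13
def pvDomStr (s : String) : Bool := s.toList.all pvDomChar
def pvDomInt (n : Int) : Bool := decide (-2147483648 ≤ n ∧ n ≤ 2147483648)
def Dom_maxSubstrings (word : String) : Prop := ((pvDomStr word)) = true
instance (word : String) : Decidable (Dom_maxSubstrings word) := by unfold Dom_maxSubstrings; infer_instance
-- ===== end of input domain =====

-- B replaces A's sliding window with lag-populated seen-set by a two-stage algorithm: first build an
-- inverted index (character -> list of occurrence positions), then one greedy scan that locates each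
-- character's earliest occurrence in the current segment through monotone pointers into the index
-- (objective: alternative; same asymptotic cost).

-- ===== PORT A =====
-- A's while loop; every Python index here is in range, so characters[k] is ported as l.getD k ' '.
-- Python's locals start/end/seen_chars/count are the recursion state (assignments inlined).
def pvLoopA (l : List Char) (length start e : Nat) (seen : PySem.Set Char) (count : Int) : Int :=
  if e < length then
    if PySem.Set.contains seen (l.getD e ' ') then
      pvLoopA l length (e + 1) ((e + 1) + 3)
        (if e + 1 < length then PySem.Set.ofList [l.getD (e + 1) ' '] else seen) (count + 1)
    else
      pvLoopA l length start (e + 1) (PySem.Set.add seen (l.getD (e - 2) ' ')) count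
  else count
termination_by length - e
decreasing_by all_goals omega

def maxSubstrings (word : String) : Int :=
  let characters := word.toList
  if characters.length < 4 then 0
  else
    pvLoopA characters characters.length 0 3
      (PySem.Set.add PySem.Set.empty (characters.getD 0 ' ')) 0

-- ===== PORT B =====
-- stage 1 of Source B: pos.setdefault(c, []).append(i), i.e. pos[c] = pos.get(c, []) + [i], over enumerate(word)
def pvBuild (l : List Char) (n i : Nat) (d : PySem.Dict Char (List Nat)) : PySem.Dict Char (List Nat) :=
  if i < n then
    pvBuild l n (i + 1) (d.insert (l.getD i ' ') (d.getD (l.getD i ' ') [] ++ [i]))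
  else d
termination_by n - i
decreasing_by omega

-- Source B's inner `while p[k] < start: k += 1`; the k < p.length guard only makes the recursion total
-- (Python would raise IndexError past the end, which the loop never reaches).
def pvAdv (p : List Nat) (start k : Nat) : Nat :=
  if h : k < p.length ∧ p.getD k 0 < start then pvAdv p start (k + 1) else k
termination_by p.length - k
decreasing_by omega

-- stage 2 of Source B: the greedy scan; pos[c] is ported as getD (the key is always present: c occurs at i).
def pvLoopB (l : List Char) (pos : PySem.Dict Char (List Nat)) (n i start : Nat)
    (ptr : PySem.Dict Char Nat) (count : Int) : Int :=
  if i < n then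
    let c := l.getD i ' '
    let p := pos.getD c []
    let k := pvAdv p start (ptr.getD c 0)
    if 3 ≤ (i : Int) - (p.getD k 0 : Int) then
      pvLoopB l pos n (i + 1) (i + 1) (ptr.insert c k) (count + 1)
    else
      pvLoopB l pos n (i + 1) start (ptr.insert c k) count
  else count
termination_by n - i
decreasing_by all_goals omega

def maxSubstrings_alt (word : String) : Int :=
  let l := word.toList
  pvLoopB l (pvBuild l l.length 0 PySem.Dict.empty) l.length 0 0 PySem.Dict.empty 0

-- ===== PRECONDITION & SPEC =====
def Spec_maxSubstrings (word : String) (out : Int) : Prop := out = maxSubstrings_alt word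
instance (word : String) (out : Int) : Decidable (Spec_maxSubstrings word out) := by unfold Spec_maxSubstrings; infer_instance

-- ===== CLAIM (what is proved, stated in full; the proofs are below) =====
def Claim_equal_maxSubstrings : Prop := ∀ (word : String), Dom_maxSubstrings word → Spec_maxSubstrings word (maxSubstrings word)

-- ===== LEMMAS AND PROOFS =====

-- the positions of c in l, in increasing order (what Source B's index stores under key c)
def occ (l : List Char) (c : Char) : List Nat :=
  (List.range l.length).filter (fun j => l.getD j ' ' == c)

theorem occ_mem {l : List Char} {c : Char} {j : Nat} :
    j ∈ occ l c ↔ j < l.length ∧ l.getD j ' ' = c := by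
  simp [occ, List.mem_filter, List.mem_range]

theorem occ_pairwise (l : List Char) (c : Char) : (occ l c).Pairwise (· < ·) :=
  List.Pairwise.sublist List.filter_sublist List.pairwise_lt_range

theorem occ_lt {l : List Char} {c : Char} {j1 j2 : Nat} (h12 : j1 < j2)
    (h2 : j2 < (occ l c).length) :
    (occ l c).getD j1 0 < (occ l c).getD j2 0 := by
  have h1 : j1 < (occ l c).length := lt_trans h12 h2
  rw [List.getD_eq_getElem _ _ h1, List.getD_eq_getElem _ _ h2]
  exact List.pairwise_iff_getElem.mp (occ_pairwise l c) j1 j2 h1 h2 h12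

theorem occ_getD_mem {l : List Char} {c : Char} {m : Nat} (h : m < (occ l c).length) :
    (occ l c).getD m 0 ∈ occ l c := by
  rw [List.getD_eq_getElem _ _ h]; exact List.getElem_mem h

-- earliest index k ∈ [s, t) with l[k] = c
def eFind (l : List Char) (s t : Nat) (c : Char) : Option Nat :=
  (List.range' s (t - s)).find? (fun k => l.getD k ' ' == c)

theorem eFind_self (l : List Char) (s : Nat) (c : Char) : eFind l s s c = none := by
  simp [eFind]

theorem eFind_succ (l : List Char) {s t : Nat} (c : Char) (h : s ≤ t) :
    eFind l s (t + 1) c =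
      ((eFind l s t c).or (if l.getD t ' ' == c then some t else none)) := by
  unfold eFind
  have h1 : t + 1 - s = (t - s) + 1 := by omega
  have h2 : s + 1 * (t - s) = t := by omega
  rw [h1, List.range'_concat, h2, List.find?_append]
  have hsing : List.find? (fun k => l.getD k ' ' == c) [t]
      = (if l.getD t ' ' == c then some t else none) := by
    cases hb : (l.getD t ' ' == c) <;>
      · simp only [List.getD] at hb
        simp [List.find?, hb]
  rw [hsing]

theorem eFind_isSome {l : List Char} {s t : Nat} {c : Char} :
    (eFind l s t c).isSome ↔ ∃ k, s ≤ k ∧ k < t ∧ l.getD k ' ' = c := by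
  simp only [eFind, List.find?_isSome, List.mem_range'_1, beq_iff_eq]
  constructor
  · rintro ⟨k, ⟨h1, h2⟩, h3⟩; exact ⟨k, h1, by omega, h3⟩
  · rintro ⟨k, h1, h2, h3⟩; exact ⟨k, ⟨h1, by omega⟩, h3⟩

theorem pv_contains_empty (c : Char) :
    PySem.Set.contains (PySem.Set.empty : PySem.Set Char) c = false := rfl

theorem pv_contains_add (seen : PySem.Set Char) (a c : Char) :
    PySem.Set.contains (PySem.Set.add seen a) c = (PySem.Set.contains seen c || (a == c)) := by
  cases hb : PySem.Set.contains (PySem.Set.add seen a) c with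
  | false =>
    have hnm : c ∉ PySem.Set.add seen a := by
      intro hm
      have := (PySem.Set.contains_iff _ _).mpr hm
      rw [hb] at this
      cases this
    rw [PySem.Set.mem_add] at hnm
    push_neg at hnm
    have h1 : PySem.Set.contains seen c = false := by
      cases hs : PySem.Set.contains seen c with
      | false => rfl
      | true => exact absurd ((PySem.Set.contains_iff _ _).mp hs) hnm.1
    have h2 : (a == c) = false := by
      simp only [beq_eq_false_iff_ne, ne_eq]
      intro h; exact hnm.2 h.symm
    rw [h1, h2]
    rfl
  | true =>
    have hm := (PySem.Set.contains_iff _ _).mp hb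
    rw [PySem.Set.mem_add] at hm
    rcases hm with hm | hm
    · rw [(PySem.Set.contains_iff _ _).mpr hm, Bool.true_or]
    · subst hm
      simp

theorem pv_contains_singleton (a c : Char) :
    PySem.Set.contains (PySem.Set.ofList [a]) c = (a == c) := by
  have h : PySem.Set.ofList [a] = PySem.Set.add PySem.Set.empty a := rfl
  rw [h, pv_contains_add, pv_contains_empty, Bool.false_or]

-- stage-1 invariant: the index built from position i onwards extends each stored list by the
-- occurrences in [i, n)
theorem build_getD (l : List Char) (n : Nat) : ∀ (K i : Nat) (d : PySem.Dict Char (List Nat))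
    (c : Char), n - i ≤ K →
    (pvBuild l n i d).getD c [] =
      d.getD c [] ++ (List.range' i (n - i)).filter (fun j => l.getD j ' ' == c) := by
  intro K
  induction K with
  | zero =>
    intro i d c hK
    rw [pvBuild, if_neg (by omega)]
    rw [show n - i = 0 from by omega]
    simp
  | succ K ih =>
    intro i d c hK
    by_cases hin : i < n
    case neg =>
      rw [pvBuild, if_neg hin]
      rw [show n - i = 0 from by omega]
      simp
    case pos =>
    rw [pvBuild, if_pos hin,
      ih (i + 1) _ c (by omega)]
    rw [show n - i = (n - (i + 1)) + 1 from by omega, List.range'_succ, List.filter_cons]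
    rw [PySem.Dict.getD_insert]
    by_cases hc : c = l.getD i ' '
    · subst hc
      rw [if_pos rfl, if_pos (beq_self_eq_true _)]
      simp
    · rw [if_neg hc]
      have hb : (l.getD i ' ' == c) = false := by
        simp only [beq_eq_false_iff_ne, ne_eq]
        intro h; exact hc h.symm
      rw [if_neg (by rw [hb]; exact Bool.false_ne_true)]

theorem build_occ (l : List Char) (c : Char) :
    (pvBuild l l.length 0 PySem.Dict.empty).getD c [] = occ l c := by
  rw [build_getD l l.length l.length 0 PySem.Dict.empty c (by omega)]
  rw [PySem.Dict.getD_empty]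
  simp [occ, List.range_eq_range']

-- the pointer-advance loop finds the least index ≥ the old pointer whose position is ≥ start,
-- provided some stored position is ≥ start and the old pointer never passed one
theorem adv_spec (p : List Nat) (s : Nat) : ∀ (K k0 : Nat), p.length - k0 ≤ K →
    (∀ j, j < k0 → p.getD j 0 < s) → (∃ m, m < p.length ∧ s ≤ p.getD m 0) →
    pvAdv p s k0 < p.length ∧ s ≤ p.getD (pvAdv p s k0) 0 ∧
      ∀ j, j < pvAdv p s k0 → p.getD j 0 < s := by
  intro K
  induction K with
  | zero =>
    intro k0 hK h0 ⟨m, hm, hms⟩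
    exfalso
    have : k0 ≤ m := by
      by_contra h
      push_neg at h
      have := h0 m h
      omega
    omega
  | succ K ih =>
    intro k0 hK h0 hw
    obtain ⟨m, hm, hms⟩ := hw
    have hk0m : k0 ≤ m := by
      by_contra h
      push_neg at h
      have := h0 m h
      omega
    rw [pvAdv]
    by_cases h : k0 < p.length ∧ p.getD k0 0 < s
    · rw [dif_pos h]
      refine ih (k0 + 1) (by omega) ?_ ⟨m, hm, hms⟩
      intro j hj
      by_cases hjk : j < k0
      · exact h0 j hjk
      · have : j = k0 := by omega
        subst this
        exact h.2
    · rw [dif_neg h]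
      push_neg at h
      have hk0 : k0 < p.length := by omega
      exact ⟨hk0, h hk0, h0⟩

-- the simultaneous invariant: A sits at window end max i (s+3) with seen = chars of l[s..e-3];
-- B sits at index i with segment start s and pointers that never passed a position ≥ s.
theorem grand (l : List Char) (pos : PySem.Dict Char (List Nat))
    (hpos : ∀ c, pos.getD c [] = occ l c) : ∀ (K s i : Nat) (seen : PySem.Set Char)
    (ptr : PySem.Dict Char Nat) (count : Int),
    l.length - i ≤ K → s ≤ i →
    (∀ c, PySem.Set.contains seen c = (eFind l s (max i (s + 3) - 2) c).isSome) →
    (∀ c j, j < ptr.getD c 0 → (occ l c).getD j 0 < s) →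
    pvLoopA l l.length s (max i (s + 3)) seen count = pvLoopB l pos l.length i s ptr count := by
  intro K
  induction K with
  | zero =>
    intro s i seen ptr count hK hsi hseen hptr
    rw [pvLoopA, pvLoopB, if_neg (by omega), if_neg (by omega)]
  | succ K ih =>
    intro s i seen ptr count hK hsi hseen hptr
    by_cases hin : i < l.length
    case neg =>
      rw [pvLoopA, pvLoopB, if_neg (by omega), if_neg (by omega)]
    case pos =>
    -- shared facts about B's step at index i
    have hiocc : i ∈ occ l (l.getD i ' ') := occ_mem.mpr ⟨hin, rfl⟩
    obtain ⟨m, hm, hmi⟩ := List.getElem_of_mem hiocc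
    have hmi' : (occ l (l.getD i ' ')).getD m 0 = i := by
      rw [List.getD_eq_getElem _ _ hm]; exact hmi
    obtain ⟨hk1, hk2, hk3⟩ := adv_spec (occ l (l.getD i ' ')) s
      ((occ l (l.getD i ' ')).length) (ptr.getD (l.getD i ' ') 0) (by omega)
      (fun j hj => hptr _ j hj) ⟨m, hm, by rw [hmi']; exact hsi⟩
    -- abbreviations
    have hkm : pvAdv (occ l (l.getD i ' ')) s (ptr.getD (l.getD i ' ') 0) ≤ m := by
      by_contra h
      push_neg at h
      have := hk3 m h
      omega
    have hvle : (occ l (l.getD i ' ')).getD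
        (pvAdv (occ l (l.getD i ' ')) s (ptr.getD (l.getD i ' ') 0)) 0 ≤ i := by
      rcases Nat.lt_or_ge (pvAdv (occ l (l.getD i ' ')) s (ptr.getD (l.getD i ' ') 0)) m with h | h
      · have := occ_lt h hm
        omega
      · have : pvAdv (occ l (l.getD i ' ')) s (ptr.getD (l.getD i ' ') 0) = m := by omega
        rw [this, hmi']
    -- B's cut condition ⟺ A's membership test at window end i
    have hcond : (3 ≤ (i : Int) - ((occ l (l.getD i ' ')).getD
          (pvAdv (occ l (l.getD i ' ')) s (ptr.getD (l.getD i ' ') 0)) 0 : Int)) ↔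
        (eFind l s (i - 2) (l.getD i ' ')).isSome = true := by
      constructor
      · intro h
        refine eFind_isSome.mpr ⟨(occ l (l.getD i ' ')).getD
          (pvAdv (occ l (l.getD i ' ')) s (ptr.getD (l.getD i ' ') 0)) 0, hk2, by omega, ?_⟩
        exact (occ_mem.mp (occ_getD_mem hk1)).2
      · intro h
        obtain ⟨j, hj1, hj2, hj3⟩ := eFind_isSome.mp h
        have hjl : j < l.length := by omega
        have hjocc : j ∈ occ l (l.getD i ' ') := occ_mem.mpr ⟨hjl, hj3⟩
        obtain ⟨m', hm', hm'j⟩ := List.getElem_of_mem hjocc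
        have hm'j' : (occ l (l.getD i ' ')).getD m' 0 = j := by
          rw [List.getD_eq_getElem _ _ hm']; exact hm'j
        have hkm' : pvAdv (occ l (l.getD i ' ')) s (ptr.getD (l.getD i ' ') 0) ≤ m' := by
          by_contra hcon
          push_neg at hcon
          have := hk3 m' hcon
          omega
        have hvj : (occ l (l.getD i ' ')).getD
            (pvAdv (occ l (l.getD i ' ')) s (ptr.getD (l.getD i ' ') 0)) 0 ≤ j := by
          rcases Nat.lt_or_ge (pvAdv (occ l (l.getD i ' ')) s (ptr.getD (l.getD i ' ') 0)) m'
            with hlt | hge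
          · have := occ_lt hlt hm'
            omega
          · have : pvAdv (occ l (l.getD i ' ')) s (ptr.getD (l.getD i ' ') 0) = m' := by omega
            rw [this, hm'j']
        omega
    -- the new pointer table keeps the invariant for any start value ≥ s
    have hptr' : ∀ (s' : Nat), s ≤ s' → ∀ c j,
        j < (ptr.insert (l.getD i ' ')
          (pvAdv (occ l (l.getD i ' ')) s (ptr.getD (l.getD i ' ') 0))).getD c 0 →
        (occ l c).getD j 0 < s' := by
      intro s' hss' c j hj
      rw [PySem.Dict.getD_insert] at hj
      by_cases hc : c = l.getD i ' '
      · rw [if_pos hc] at hj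
        subst hc
        have := hk3 j hj
        omega
      · rw [if_neg hc] at hj
        have := hptr c j hj
        omega
    by_cases hpad : i < s + 3
    · -- padding phase: A's window end (s+3) is ahead of B's index; B cannot cut
      -- (every stored position in the segment is < 3 back)
      rw [pvLoopB, if_pos hin]
      simp only [hpos]
      rw [if_neg (by omega : ¬ (3 ≤ (i : Int) - ((occ l (l.getD i ' ')).getD
        (pvAdv (occ l (l.getD i ' ')) s (ptr.getD (l.getD i ' ') 0)) 0 : Int)))]
      rw [show max i (s + 3) = max (i + 1) (s + 3) from by omega]
      refine ih s (i + 1) seen _ count (by omega) (by omega) ?_ (hptr' s le_rfl)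
      intro c
      rw [show max (i + 1) (s + 3) - 2 = max i (s + 3) - 2 from by omega]
      exact hseen c
    · -- aligned phase: A's window end = i = B's index
      have hE : max i (s + 3) = i := by omega
      rw [hE] at hseen ⊢
      rw [pvLoopA, pvLoopB, if_pos hin, if_pos hin]
      simp only [hpos]
      by_cases hA : PySem.Set.contains seen (l.getD i ' ') = true
      · -- both cut at i
        rw [if_pos hA]
        have hsome : (eFind l s (i - 2) (l.getD i ' ')).isSome = true := by
          rw [← hseen]; exact hA
        rw [if_pos (hcond.mpr hsome)]
        by_cases h1 : i + 1 < l.length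
        · rw [if_pos h1]
          have := ih (i + 1) (i + 1) (PySem.Set.ofList [l.getD (i + 1) ' '])
            (ptr.insert (l.getD i ' ')
              (pvAdv (occ l (l.getD i ' ')) s (ptr.getD (l.getD i ' ') 0)))
            (count + 1) (by omega) le_rfl ?_ (hptr' (i + 1) (by omega))
          · rwa [show max (i + 1) ((i + 1) + 3) = (i + 1) + 3 from by omega] at this
          · intro c
            rw [show max (i + 1) ((i + 1) + 3) - 2 = (i + 1) + 1 from by omega]
            rw [eFind_succ l c (le_refl (i + 1)), eFind_self, pv_contains_singleton]
            cases hac : (l.getD (i + 1) ' ' == c) <;> simp [hac]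
        · rw [if_neg h1]
          rw [pvLoopA, pvLoopB, if_neg (by omega), if_neg (by omega)]
      · -- neither cuts at i
        rw [if_neg hA]
        have hAf : PySem.Set.contains seen (l.getD i ' ') = false := by
          cases h : PySem.Set.contains seen (l.getD i ' ')
          · rfl
          · exact absurd h hA
        have hnone : (eFind l s (i - 2) (l.getD i ' ')).isSome = false := by
          rw [← hseen]; exact hAf
        rw [if_neg (fun h => by rw [hcond.mp h] at hnone; cases hnone)]
        have hseen' : ∀ c, PySem.Set.contains (PySem.Set.add seen (l.getD (i - 2) ' ')) c
            = (eFind l s (max (i + 1) (s + 3) - 2) c).isSome := by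
          intro c
          rw [show max (i + 1) (s + 3) - 2 = (i - 2) + 1 from by omega]
          rw [eFind_succ l c (by omega : s ≤ i - 2), pv_contains_add, hseen c]
          cases h' : eFind l s (i - 2) c with
          | some k' => simp
          | none =>
            cases hac : (l.getD (i - 2) ' ' == c) <;> simp [hac]
        have h2 := ih s (i + 1) (PySem.Set.add seen (l.getD (i - 2) ' '))
          (ptr.insert (l.getD i ' ')
            (pvAdv (occ l (l.getD i ' ')) s (ptr.getD (l.getD i ' ') 0)))
          count (by omega) (by omega) hseen' (hptr' s le_rfl)
        rwa [show max (i + 1) (s + 3) = i + 1 from by omega] at h2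

-- ===== VERDICT (by name: the statement is the Claim_ definition above) =====
theorem maxSubstrings_spec : Claim_equal_maxSubstrings := by
  intro word _
  show maxSubstrings word = maxSubstrings_alt word
  unfold maxSubstrings maxSubstrings_alt
  have hg := grand word.toList (pvBuild word.toList word.toList.length 0 PySem.Dict.empty)
    (build_occ word.toList) word.toList.length 0 0
    (PySem.Set.add PySem.Set.empty (word.toList.getD 0 ' ')) PySem.Dict.empty 0
    (by omega) le_rfl ?_ ?_
  · rw [show max 0 (0 + 3) = 3 from rfl] at hg
    by_cases h4 : word.toList.length < 4
    · simp only [if_pos h4]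
      rw [← hg, pvLoopA, if_neg (by omega)]
    · simp only [if_neg h4]
      exact hg
  · intro c
    rw [show max 0 (0 + 3) - 2 = 0 + 1 from rfl]
    rw [eFind_succ word.toList c le_rfl, eFind_self, pv_contains_add, pv_contains_empty,
      Bool.false_or]
    cases hac : (word.toList.getD 0 ' ' == c) <;> simp [hac]
  · intro c j hj
    rw [PySem.Dict.getD_empty] at hj
    omega
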